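-- pv_equiv track=rewrite | github.com/juanpabl0svn/analisis | taller_final/dulces.py | caramelos_no_optimo
-- ===== SOURCE A (Python) =====
-- def caramelos_no_optimo(caramelos,k,result=0):
--   if len(caramelos) ==0:
--     return result
--
--   caramelos = sorted(caramelos)
--   result+=caramelos.pop()
--
--   for i in range(k-1,-1,-1):
--     if len(caramelos) != 0:
--       caramelos.pop(0)
--
--
--   return caramelos_no_optimo(caramelos,k,result)
-- ===== SOURCE B (Python) =====
-- def caramelos_no_optimo(caramelos, k, result=0):
--     a = sorted(caramelos)
--     lo, hi = 0, len(a) - 1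
--     step = max(k, 0)
--     while lo <= hi:
--         result += a[hi]
--         hi -= 1
--         lo += step
--     return result
-- ===== Notes on version B (the rewrite author's own statement) =====
-- stated objective: faster
-- what changed: B sorts the list once and replaces A's re-sort-and-pop recursion (one sort, one pop() and up to k pop(0) per round) by a single two-pointer sweep over the sorted array: the high pointer collects each round's maximum, the low pointer skips the k discarded minima.
import Mathlib
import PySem

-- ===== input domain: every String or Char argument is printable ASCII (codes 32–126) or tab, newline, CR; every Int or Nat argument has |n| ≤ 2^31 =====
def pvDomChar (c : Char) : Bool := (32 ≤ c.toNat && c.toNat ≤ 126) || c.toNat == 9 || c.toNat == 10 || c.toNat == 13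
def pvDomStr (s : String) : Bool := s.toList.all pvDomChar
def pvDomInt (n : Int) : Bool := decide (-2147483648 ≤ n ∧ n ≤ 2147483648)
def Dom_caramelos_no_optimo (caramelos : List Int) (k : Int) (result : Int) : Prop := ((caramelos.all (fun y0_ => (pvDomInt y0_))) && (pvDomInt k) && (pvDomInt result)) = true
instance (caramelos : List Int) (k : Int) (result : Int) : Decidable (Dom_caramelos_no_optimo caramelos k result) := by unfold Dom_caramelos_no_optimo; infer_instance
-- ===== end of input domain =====

-- B replaces A's re-sort-every-round recursion by one sort plus a two-pointer sweep (alternative/faster algorithm; same return value).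

-- ===== PORT A =====
-- one loop iteration of `if len(caramelos) != 0: caramelos.pop(0)`
def pvPopFront (l : List Int) : List Int :=
  if l.length ≠ 0 then
    match PySem.List.pop? l 0 with
    | some (_, t) => t
    | none => l
  else l

theorem pvPopFront_length_le (l : List Int) : (pvPopFront l).length ≤ l.length := by
  cases l with
  | nil => simp [pvPopFront]
  | cons x xs => simp [pvPopFront, PySem.List.pop?_zero_cons]

theorem pvFold_length_le (r : List Int) (l : List Int) :
    (r.foldl (fun acc _ => pvPopFront acc) l).length ≤ l.length := by
  induction r generalizing l with
  | nil => simp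
  | cons a t ih => exact le_trans (ih (pvPopFront l)) (pvPopFront_length_le l)

def caramelos_no_optimo (caramelos : List Int) (k : Int) (result : Int) : Int :=
  if caramelos.length = 0 then result
  else
    -- caramelos = sorted(caramelos); result += caramelos.pop()  (pop() cannot raise: the list is nonempty)
    match h : PySem.List.pop? (PySem.List.sorted caramelos (fun x => x) false) with
    | none => result
    | some (x, rest) =>
      -- the for-loop over range(k-1, -1, -1) popping the front while the list is nonempty
      caramelos_no_optimo
        ((PySem.List.pyRange (k - 1) (-1) (-1)).foldl (fun acc _ => pvPopFront acc) rest)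
        k (result + x)
termination_by caramelos.length
decreasing_by
  have h1 : rest.length + 1 = (PySem.List.sorted caramelos (fun x => x) false).length :=
    PySem.List.length_of_pop?_eq_some _ h
  have h2 := pvFold_length_le (PySem.List.pyRange (k - 1) (-1) (-1)) rest
  rw [PySem.List.length_sorted] at h1
  omega

-- ===== PORT B =====
-- the while-loop of Source B; a[hi] is ported as pyGetD with default 0 (hi is always in range when the body runs)
-- `step = max(k, 0)` is a nonnegative integer, carried as a Nat so the loop measure decreases
def pvAltLoop (a : List Int) (step : Nat) (lo : Int) (hi : Int) (result : Int) : Int :=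
  if lo ≤ hi then
    pvAltLoop a step (lo + step) (hi - 1) (result + PySem.List.pyGetD a hi 0)
  else result
termination_by (hi - lo + 1).toNat
decreasing_by omega

def caramelos_no_optimo_alt (caramelos : List Int) (k : Int) (result : Int) : Int :=
  let a := PySem.List.sorted caramelos (fun x => x) false
  let step := (max k 0).toNat
  pvAltLoop a step 0 ((a.length : Int) - 1) result

-- ===== PRECONDITION & SPEC =====
def Spec_caramelos_no_optimo (caramelos : List Int) (k : Int) (result : Int) (out : Int) : Prop := out = caramelos_no_optimo_alt caramelos k result
instance (caramelos : List Int) (k : Int) (result : Int) (out : Int) : Decidable (Spec_caramelos_no_optimo caramelos k result out) := by unfold Spec_caramelos_no_optimo; infer_instance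

-- ===== CLAIM (what is proved, stated in full; the proofs are below) =====
def Claim_equal_caramelos_no_optimo : Prop := ∀ (caramelos : List Int) (k : Int) (result : Int), Dom_caramelos_no_optimo caramelos k result → Spec_caramelos_no_optimo caramelos k result (caramelos_no_optimo caramelos k result)

-- ===== LEMMAS AND PROOFS =====

theorem pvPopFront_eq_tail (l : List Int) : pvPopFront l = l.tail := by
  cases l with
  | nil => simp [pvPopFront]
  | cons x xs => simp [pvPopFront, PySem.List.pop?_zero_cons]

theorem pvFold_eq_drop (r : List Int) (l : List Int) :
    r.foldl (fun acc _ => pvPopFront acc) l = l.drop r.length := by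
  induction r generalizing l with
  | nil => simp
  | cons a t ih =>
    rw [List.foldl_cons, ih, pvPopFront_eq_tail, List.drop_tail]
    rfl

theorem pvPop_last_of_ne_nil (l : List Int) (h : l ≠ []) :
    PySem.List.pop? l = some (l.getLast h, l.dropLast) := by
  conv_lhs => rw [← List.dropLast_concat_getLast h]
  exact PySem.List.pop?_last _ _

-- the window [lo+d, hi] of `a` is the window [lo, hi-d] of `a.drop d`
theorem pvAltLoop_drop : ∀ (n : Nat) (a : List Int) (step d : Nat) (lo hi r : Int),
    (hi - lo + 1).toNat ≤ n → 0 ≤ lo →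
    pvAltLoop a step (lo + (d : Int)) hi r = pvAltLoop (a.drop d) step lo (hi - (d : Int)) r := by
  intro n
  induction n with
  | zero =>
    intro a step d lo hi r hn hlo
    conv_lhs => rw [pvAltLoop.eq_def]
    conv_rhs => rw [pvAltLoop.eq_def]
    rw [if_neg (by omega), if_neg (by omega)]
  | succ n ih =>
    intro a step d lo hi r hn hlo
    conv_lhs => rw [pvAltLoop.eq_def]
    conv_rhs => rw [pvAltLoop.eq_def]
    by_cases hc : lo ≤ hi - (d : Int)
    · rw [if_pos (by omega), if_pos hc]
      have hidx : PySem.List.pyGetD a hi 0 = PySem.List.pyGetD (a.drop d) (hi - (d : Int)) 0 := by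
        rw [PySem.List.pyGetD_of_nonneg _ _ (by omega), PySem.List.pyGetD_of_nonneg _ _ (by omega),
          List.getD_eq_getElem?_getD, List.getD_eq_getElem?_getD, List.getElem?_drop]
        congr 2
        omega
      rw [hidx]
      have harg : lo + (d : Int) + (step : Int) = (lo + (step : Int)) + (d : Int) := by ring
      rw [harg, ih a step d (lo + (step : Int)) (hi - 1) _ (by omega) (by omega)]
      congr 1
      omega
    · rw [if_neg (by omega), if_neg hc]

-- the last element of `a` is invisible to a window that stops at a.length - 2
theorem pvAltLoop_dropLast : ∀ (n : Nat) (a : List Int) (step : Nat) (lo hi r : Int),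
    (hi - lo + 1).toNat ≤ n → 0 ≤ lo → hi < (a.length : Int) - 1 →
    pvAltLoop a step lo hi r = pvAltLoop a.dropLast step lo hi r := by
  intro n
  induction n with
  | zero =>
    intro a step lo hi r hn hlo hhi
    conv_lhs => rw [pvAltLoop.eq_def]
    conv_rhs => rw [pvAltLoop.eq_def]
    rw [if_neg (by omega), if_neg (by omega)]
  | succ n ih =>
    intro a step lo hi r hn hlo hhi
    conv_lhs => rw [pvAltLoop.eq_def]
    conv_rhs => rw [pvAltLoop.eq_def]
    by_cases hc : lo ≤ hi
    · rw [if_pos hc, if_pos hc]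
      have hidx : PySem.List.pyGetD a hi 0 = PySem.List.pyGetD a.dropLast hi 0 := by
        rw [PySem.List.pyGetD_of_nonneg _ _ (by omega), PySem.List.pyGetD_of_nonneg _ _ (by omega),
          List.getD_eq_getElem?_getD, List.getD_eq_getElem?_getD,
          List.dropLast_eq_take, List.getElem?_take_of_lt (by omega)]
      rw [hidx, ih a step (lo + (step : Int)) (hi - 1) _ (by omega) (by omega) (by omega)]
    · rw [if_neg hc, if_neg hc]

-- main invariant: on an already-sorted list, A's round-by-round recursion is B's two-pointer sweep
theorem pv_main : ∀ (n : Nat) (s : List Int) (k r : Int), s.length ≤ n →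
    s.Pairwise (· ≤ ·) →
    caramelos_no_optimo s k r = pvAltLoop s (max k 0).toNat 0 ((s.length : Int) - 1) r := by
  intro n
  induction n with
  | zero =>
    intro s k r hn _
    have hs : s = [] := List.length_eq_zero_iff.mp (by omega)
    subst hs
    rw [caramelos_no_optimo, pvAltLoop]
    simp
  | succ n ih =>
    intro s k r hn hp
    by_cases hnil : s = []
    · subst hnil
      rw [caramelos_no_optimo, pvAltLoop]
      simp
    · have hlen : 1 ≤ s.length := List.length_pos_iff.mpr hnil
      have hsort : PySem.List.sorted s (fun x => x) false = s :=
        PySem.List.sorted_eq_self_of_pairwise s (fun x => x) hp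
      conv_lhs => rw [caramelos_no_optimo.eq_def]
      rw [if_neg (by omega)]
      set m : Nat := (max k 0).toNat with hmdef
      split
      · -- pop? returned none: impossible on a nonempty list
        rename_i heq
        rw [hsort, pvPop_last_of_ne_nil s hnil] at heq
        cases heq
      · rename_i x rest heq
        rw [hsort, pvPop_last_of_ne_nil s hnil] at heq
        simp only [Option.some.injEq, Prod.mk.injEq] at heq
        obtain ⟨hx, hrest⟩ := heq
        subst hx
        subst hrest
        rw [pvFold_eq_drop, PySem.List.length_pyRange_neg_one,
          show (k - 1 - -1).toNat = m by omega]
        have hsub : (s.dropLast.drop m).Pairwise (fun a b => a ≤ b) :=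
          hp.sublist ((List.drop_sublist m s.dropLast).trans (List.dropLast_sublist s))
        have hlen2 : (s.dropLast.drop m).length ≤ n := by
          simp only [List.length_drop, List.length_dropLast]
          omega
        rw [ih (s.dropLast.drop m) k (r + s.getLast hnil) hlen2 hsub]
        conv_rhs => rw [pvAltLoop.eq_def]
        rw [if_pos (by omega)]
        have hlast : PySem.List.pyGetD s ((s.length : Int) - 1) 0 = s.getLast hnil := by
          rw [PySem.List.pyGetD_of_nonneg _ _ (by omega), List.getD_eq_getElem?_getD,
            show ((s.length : Int) - 1).toNat = s.length - 1 by omega,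
            List.getElem?_eq_getElem (by omega), List.getLast_eq_getElem hnil]
          rfl
        rw [hlast]
        rw [pvAltLoop_dropLast ((s.length : Int) - 1 - 1 - (0 + (m : Int)) + 1).toNat s m
          (0 + (m : Int)) ((s.length : Int) - 1 - 1) _ (le_refl _) (by omega) (by omega)]
        rw [pvAltLoop_drop ((s.length : Int) - 1 - 1 - 0 + 1).toNat s.dropLast m m 0
          ((s.length : Int) - 1 - 1) _ (by omega) (by omega)]
        by_cases hcase : m ≤ s.length - 1
        · have hl : (s.dropLast.drop m).length = s.length - 1 - m := by simp
          rw [hl]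
          congr 1
          omega
        · have h0 : (s.dropLast.drop m).length = 0 := by
            simp only [List.length_drop, List.length_dropLast]
            omega
          conv_lhs => rw [pvAltLoop.eq_def]
          conv_rhs => rw [pvAltLoop.eq_def]
          rw [if_neg (by omega), if_neg (by omega)]

-- A's first round sorts its argument; afterwards the argument is already sorted
theorem pvA_sorted_arg (c : List Int) (k r : Int) :
    caramelos_no_optimo c k r =
      caramelos_no_optimo (PySem.List.sorted c (fun x => x) false) k r := by
  conv_lhs => rw [caramelos_no_optimo.eq_def]
  conv_rhs => rw [caramelos_no_optimo.eq_def]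
  simp only [PySem.List.length_sorted]
  by_cases h0 : c.length = 0
  · rw [if_pos h0, if_pos h0]
  · rw [if_neg h0, if_neg h0]
    split
    · rename_i heq1
      split
      · rfl
      · rename_i x rest heq2
        rw [PySem.List.sorted_sorted] at heq2
        rw [heq1] at heq2
        cases heq2
    · rename_i x rest heq1
      split
      · rename_i heq2
        rw [PySem.List.sorted_sorted] at heq2
        rw [heq1] at heq2
        cases heq2
      · rename_i x2 rest2 heq2
        rw [PySem.List.sorted_sorted] at heq2
        rw [heq1] at heq2
        simp only [Option.some.injEq, Prod.mk.injEq] at heq2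
        obtain ⟨hx, hrest⟩ := heq2
        rw [hx, hrest]

-- ===== VERDICT (by name: the statement is the Claim_ definition above) =====
theorem caramelos_no_optimo_spec : Claim_equal_caramelos_no_optimo := by
  intro caramelos k result _hdom
  unfold Spec_caramelos_no_optimo caramelos_no_optimo_alt
  rw [pvA_sorted_arg]
  rw [pv_main (PySem.List.sorted caramelos (fun x => x) false).length _ k result (le_refl _)
    (PySem.List.sorted_pairwise caramelos (fun x => x))]
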